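-- pv_equiv track=rewrite | github.com/FC-Yohsin/yohsin3d | yohsin3d/communicators/y3d_communicator/bit_codec.py | bits_to_string
-- ===== SOURCE A (Python) =====
-- communication_alphabet = "abcdefghijklmnopqrstuvwxyzABCDEFGHIJKLMNOPQRSTUVWXYZ0123456789*#"
--
-- def bits_to_string(bitfield_list):
--     message = ""
--
--     index = []
--     index_size = (len(bitfield_list) + 5) // 6
--     index = [0] * index_size
--     ctr = 0
--     for i in range(index_size):
--         index[i] = 0
--         for j in range(6):
--             index[i] *= 2
--             if ctr < len(bitfield_list):
--                 index[i] += bitfield_list[ctr]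
--                 ctr += 1
--
--     for i in range(index_size):
--         message += communication_alphabet[index[i]]
--
--     return message
-- ===== SOURCE B (Python) =====
-- communication_alphabet = "abcdefghijklmnopqrstuvwxyzABCDEFGHIJKLMNOPQRSTUVWXYZ0123456789*#"
--
-- def bits_to_string(bitfield_list):
--     chars = []
--     value = 0
--     count = 0
--     for bit in bitfield_list:
--         value = value * 2 + bit
--         count += 1
--         if count == 6:
--             chars.append(communication_alphabet[value])
--             value = 0
--             count = 0
--     if count > 0:
--         value <<= 6 - count
--         chars.append(communication_alphabet[value])
--     return "".join(chars)
-- ===== Notes on version B (the rewrite author's own statement) =====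
-- stated objective: simpler
-- what changed: Drops A's two-phase structure (precompute the group count, fill an index array with a nested range(6) loop, then render it in a second pass) in favour of one streaming pass that keeps a running value/count per bit, emits a character each time six bits are collected, and left-shifts the final partial group.
import Mathlib
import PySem

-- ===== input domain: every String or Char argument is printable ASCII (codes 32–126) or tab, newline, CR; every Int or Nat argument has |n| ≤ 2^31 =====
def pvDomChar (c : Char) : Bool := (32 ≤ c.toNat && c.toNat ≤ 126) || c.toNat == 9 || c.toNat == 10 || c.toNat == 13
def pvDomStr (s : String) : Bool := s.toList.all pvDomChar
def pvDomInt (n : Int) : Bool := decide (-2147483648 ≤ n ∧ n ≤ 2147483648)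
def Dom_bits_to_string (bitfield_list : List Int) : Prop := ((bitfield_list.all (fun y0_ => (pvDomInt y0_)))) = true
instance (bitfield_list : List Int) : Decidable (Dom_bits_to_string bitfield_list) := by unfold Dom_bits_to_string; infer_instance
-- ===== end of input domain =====

-- B replaces A's two-phase loop structure (index array filled by a nested range(6)
-- loop, then a second rendering pass) by a single streaming pass per bit; equivalence
-- of the return values is proved on Pre_ (the inputs where the Python A returns).

-- ===== PORT A =====
-- module constant shared by both Python versions
def communication_alphabet : String :=
  "abcdefghijklmnopqrstuvwxyzABCDEFGHIJKLMNOPQRSTUVWXYZ0123456789*#"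

-- alphabet[v]: the one-character string Python yields; outside Pre_ Python raises
-- IndexError (pyGet? = none) and the .toList there is [] (never reached under Pre_)
def pvCharAt (v : Int) : String :=
  String.ofList (PySem.Str.pyGet? communication_alphabet v).toList

def bits_to_string (bitfield_list : List Int) : String :=
  let n : Int := (bitfield_list.length : Int)
  let index_size : Int := PySem.Int.floordiv (n + 5) 6
  let st :=
    (PySem.List.pyRange 0 index_size 1).foldl
      (fun (st : List Int × Int) _i =>
        let inner :=
          (PySem.List.pyRange 0 6 1).foldl
            (fun (p : Int × Int) _j =>
              let v := p.1 * 2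
              if p.2 < n then (v + (PySem.List.pyGet? bitfield_list p.2).getD 0, p.2 + 1)
              else (v, p.2))
            (0, st.2)
        (st.1 ++ [inner.1], inner.2))
      (([] : List Int), (0 : Int))
  st.1.foldl (fun m v => m ++ pvCharAt v) ""

-- ===== PORT B =====
def bits_to_string_alt (bitfield_list : List Int) : String :=
  let st :=
    bitfield_list.foldl
      (fun (st : List String × Int × Int) bit =>
        let v := st.2.1 * 2 + bit
        let c := st.2.2 + 1
        if c == 6 then (st.1 ++ [pvCharAt v], 0, 0) else (st.1, v, c))
      (([] : List String), (0 : Int), (0 : Int))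
  let chars :=
    if st.2.2 > 0 then st.1 ++ [pvCharAt (st.2.1 * 2 ^ (6 - st.2.2).toNat)] else st.1
  PySem.Str.join "" chars

-- ===== PRECONDITION & SPEC =====
-- value of the i-th 6-bit group (last group left-padded with zeros), stated
-- directly on the input list; used only by Pre_
def pvGroupVal (l : List Int) (i : Nat) : Int :=
  (((l.drop (6 * i)).take 6).foldl (fun a b => a * 2 + b) 0)
    * 2 ^ (6 - ((l.drop (6 * i)).take 6).length)

-- Pre_ holds exactly when every 6-bit group value is a valid (possibly negative)
-- Python index into the 64-char alphabet; outside it A raises IndexError.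
def Pre_bits_to_string (bitfield_list : List Int) : Prop :=
  ∀ i < (bitfield_list.length + 5) / 6,
    -64 ≤ pvGroupVal bitfield_list i ∧ pvGroupVal bitfield_list i ≤ 63

instance (bitfield_list : List Int) : Decidable (Pre_bits_to_string bitfield_list) := by
  unfold Pre_bits_to_string; infer_instance

def pvWitness_bits_to_string : List Int := [1, 0, 1, 1, 0, 1, 1, 0]

def Spec_bits_to_string (bitfield_list : List Int) (out : String) : Prop :=
  out = bits_to_string_alt bitfield_list
instance (bitfield_list : List Int) (out : String) : Decidable (Spec_bits_to_string bitfield_list out) := by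
  unfold Spec_bits_to_string; infer_instance

-- ===== CLAIM (what is proved, stated in full; the proofs are below) =====
def Claim_equal_bits_to_string : Prop := ∀ (bitfield_list : List Int), Dom_bits_to_string bitfield_list → Pre_bits_to_string bitfield_list → Spec_bits_to_string bitfield_list (bits_to_string bitfield_list)

-- ===== LEMMAS AND PROOFS =====

-- running 6-bit value accumulation
def pvFoldMul (v : Int) (xs : List Int) : Int := xs.foldl (fun a b => a * 2 + b) v

-- value of a (≤ 6 long) group, left-padded with zeros to 6 bits
def pvPadVal (c : List Int) : Int := pvFoldMul 0 c * 2 ^ (6 - c.length)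

-- the list of group values of a bit list, one per 6-bit chunk
def pvChunks6 : List Int → List Int
  | [] => []
  | x :: xs => pvPadVal ((x :: xs).take 6) :: pvChunks6 ((x :: xs).drop 6)
termination_by l => l.length
decreasing_by simp

theorem pvChunks6_nil : pvChunks6 [] = [] := by
  rw [pvChunks6.eq_def]

theorem pvChunks6_cons (x : Int) (xs : List Int) :
    pvChunks6 (x :: xs) = pvPadVal ((x :: xs).take 6) :: pvChunks6 ((x :: xs).drop 6) := by
  rw [pvChunks6.eq_def]

-- A's inner loop body
def pvInnF (l : List Int) (p : Int × Int) : Int × Int :=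
  let v := p.1 * 2
  if p.2 < (l.length : Int) then (v + (PySem.List.pyGet? l p.2).getD 0, p.2 + 1)
  else (v, p.2)

-- A's outer loop body
def pvOutF (l : List Int) (st : List Int × Int) : List Int × Int :=
  let inner := (PySem.List.pyRange 0 6 1).foldl (fun p _ => pvInnF l p) (0, st.2)
  (st.1 ++ [inner.1], inner.2)

-- a foldl whose function ignores the list elements is a function iteration
theorem pv_foldl_const {α β : Type} (f : α → α) (init : α) (r : List β) :
    r.foldl (fun a _ => f a) init = f^[r.length] init := by
  induction r generalizing init with
  | nil => rfl
  | cons x xs ih => simp [List.foldl_cons, ih, Function.iterate_succ_apply]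

-- A's fuel-indexed chunk list from start position c
def pvChunkFrom (l : List Int) : Nat → Nat → List Int
  | 0, _ => []
  | m + 1, c => pvPadVal ((l.drop c).take 6) :: pvChunkFrom l m (c + ((l.drop c).take 6).length)

theorem pv_inner_iter (l : List Int) (j : Nat) :
    ∀ (v : Int) (c : Nat),
      (pvInnF l)^[j] (v, (c : Int)) =
        (pvFoldMul v ((l.drop c).take j) * 2 ^ (j - ((l.drop c).take j).length),
         ((c + ((l.drop c).take j).length : Nat) : Int)) := by
  induction j with
  | zero => intro v c; simp [pvFoldMul]
  | succ j ih =>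
    intro v c
    rw [Function.iterate_succ_apply]
    by_cases h : c < l.length
    · have hd : l.drop c = l[c] :: l.drop (c + 1) := List.drop_eq_getElem_cons h
      have hstep : pvInnF l (v, (c : Int)) = (v * 2 + l[c], ((c : Int) + 1)) := by
        unfold pvInnF
        rw [if_pos (by show (c:Int) < (l.length:Int); exact_mod_cast h)]
        simp [List.getElem?_eq_getElem h]
      rw [hstep]
      have hc1 : ((c : Int) + 1) = (((c + 1 : Nat)) : Int) := by push_cast; ring
      rw [hc1, ih (v * 2 + l[c]) (c + 1)]
      conv_rhs => rw [hd, List.take_succ_cons]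
      simp only [pvFoldMul, List.foldl_cons, List.length_cons, Prod.mk.injEq]
      constructor
      · rw [Nat.succ_sub_succ]
      · push_cast; ring
    · have hd : l.drop c = [] := List.drop_eq_nil_of_le (by omega)
      have hstep : pvInnF l (v, (c : Int)) = (v * 2, (c : Int)) := by
        unfold pvInnF
        rw [if_neg (by show ¬ (c:Int) < (l.length:Int); exact_mod_cast h)]
      rw [hstep, ih (v * 2) c, hd]
      simp [pvFoldMul, pow_succ]; ring

theorem pv_outer_iter (l : List Int) (m : Nat) :
    ∀ (c : Nat) (acc : List Int), c ≤ l.length →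
      (pvOutF l)^[m] (acc, (c : Int)) =
        (acc ++ pvChunkFrom l m c, ((min l.length (c + 6 * m) : Nat) : Int)) := by
  induction m with
  | zero => intro c acc hc; simp [pvChunkFrom]; omega
  | succ m ih =>
    intro c acc hc
    rw [Function.iterate_succ_apply]
    have hlen6 : (PySem.List.pyRange 0 6 1).length = 6 := by decide
    have hstep : pvOutF l (acc, (c : Int)) =
        (acc ++ [pvPadVal ((l.drop c).take 6)],
         ((c + ((l.drop c).take 6).length : Nat) : Int)) := by
      unfold pvOutF
      rw [pv_foldl_const (pvInnF l) (0, (c : Int)) _, hlen6, pv_inner_iter l 6 0 c]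
      simp [pvPadVal]
    rw [hstep]
    have hlen : ((l.drop c).take 6).length = min 6 (l.length - c) := by
      simp [List.length_take, List.length_drop]
    have hc' : c + ((l.drop c).take 6).length ≤ l.length := by omega
    rw [ih _ _ hc']
    simp only [Prod.mk.injEq]
    refine ⟨?_, ?_⟩
    · simp [pvChunkFrom, List.append_assoc]
    · congr 1; omega

theorem pv_chunkFrom_eq (l : List Int) (m : Nat) :
    ∀ c, c ≤ l.length → m = (l.length - c + 5) / 6 →
      pvChunkFrom l m c = pvChunks6 (l.drop c) := by
  induction m with
  | zero =>
    intro c hc hm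
    have : l.length ≤ c := by omega
    have hd : l.drop c = [] := List.drop_eq_nil_of_le this
    simp [pvChunkFrom, hd, pvChunks6]
  | succ m ih =>
    intro c hc hm
    have hlt : c < l.length := by omega
    have hd : l.drop c ≠ [] := by
      intro h; have := List.drop_eq_nil_iff.mp h; omega
    obtain ⟨x, xs, hx⟩ := List.exists_cons_of_ne_nil hd
    have hlen : ((l.drop c).take 6).length = min 6 (l.length - c) := by
      simp [List.length_take, List.length_drop]
    unfold pvChunkFrom
    rw [hx, pvChunks6_cons, ← hx]
    congr 1
    have hdd : (l.drop c).drop 6 = l.drop (c + 6) := by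
      rw [List.drop_drop]
    by_cases h6 : 6 ≤ l.length - c
    · have : c + ((l.drop c).take 6).length = c + 6 := by omega
      rw [this, ih (c + 6) (by omega) (by omega), hdd]
    · -- last, partial chunk: m = 0 and nothing remains
      have hm0 : m = 0 := by omega
      have : l.drop (c + 6) = [] := List.drop_eq_nil_of_le (by omega)
      rw [hm0, hdd, this]
      simp [pvChunkFrom, pvChunks6]

theorem pv_join_nil : PySem.Str.join "" ([] : List String) = "" := by
  apply String.ext
  simp [PySem.Str.join, PySem.Chars.join, List.intercalate]

theorem pv_join_cons (s : String) (ss : List String) :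
    PySem.Str.join "" (s :: ss) = s ++ PySem.Str.join "" ss := by
  apply String.ext
  cases ss with
  | nil => simp [PySem.Str.join, PySem.Chars.join, List.intercalate]
  | cons t ts =>
    simp [PySem.Str.join, PySem.Chars.join, List.intercalate]

-- rendering: A's fold of string appends equals "".join of the mapped chunk chars
theorem pv_render_eq (vs : List Int) :
    ∀ (m : String), vs.foldl (fun m v => m ++ pvCharAt v) m
      = m ++ PySem.Str.join "" (vs.map pvCharAt) := by
  induction vs with
  | nil =>
    intro m
    rw [List.foldl_nil, List.map_nil, pv_join_nil]
    apply String.ext; simp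
  | cons v vs ih =>
    intro m
    rw [List.foldl_cons, List.map_cons, ih, pv_join_cons]
    apply String.ext; simp

theorem pv_isize (n : Nat) :
    (PySem.Int.floordiv ((n : Int) + 5) 6).toNat = (n + 5) / 6 ∧
      0 ≤ PySem.Int.floordiv ((n : Int) + 5) 6 := by
  have h : PySem.Int.floordiv ((n : Int) + 5) 6 = (((n + 5) / 6 : Nat) : Int) := by
    rw [PySem.Int.floordiv_eq_iff_of_pos (by omega)]
    push_cast
    omega
  rw [h]; omega

-- A computes the rendered chunk values
theorem pv_A_eq (l : List Int) :
    bits_to_string l = PySem.Str.join "" ((pvChunks6 l).map pvCharAt) := by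
  simp only [bits_to_string]
  obtain ⟨h1, h2⟩ := pv_isize l.length
  have hlen : (PySem.List.pyRange 0 (PySem.Int.floordiv ((l.length : Int) + 5) 6) 1).length
      = (l.length + 5) / 6 := by
    rw [PySem.List.length_pyRange_one]; omega
  have hfold :
      (PySem.List.pyRange 0 (PySem.Int.floordiv ((l.length : Int) + 5) 6) 1).foldl
        (fun (st : List Int × Int) _i =>
          let inner :=
            (PySem.List.pyRange 0 6 1).foldl
              (fun (p : Int × Int) _j =>
                let v := p.1 * 2
                if p.2 < (l.length : Int) then (v + (PySem.List.pyGet? l p.2).getD 0, p.2 + 1)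
                else (v, p.2))
              (0, st.2)
          (st.1 ++ [inner.1], inner.2))
        (([] : List Int), (0 : Int))
      = (pvOutF l)^[(l.length + 5) / 6] (([] : List Int), ((0 : Nat) : Int)) := by
    rw [← hlen]
    exact pv_foldl_const (pvOutF l) _ _
  rw [hfold, pv_outer_iter l _ 0 [] (by omega),
      pv_chunkFrom_eq l _ 0 (by omega) (by omega)]
  simp only [List.drop_zero, List.nil_append]
  exact pv_render_eq (pvChunks6 l) ""

-- B's loop body
def pvStepB (st : List String × Int × Int) (bit : Int) : List String × Int × Int :=
  let v := st.2.1 * 2 + bit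
  let c := st.2.2 + 1
  if c == 6 then (st.1 ++ [pvCharAt v], 0, 0) else (st.1, v, c)

-- a partial group (fewer than 6 bits reached) just accumulates
theorem pv_B_partial (chunk : List Int) :
    ∀ (cs : List String) (v : Int) (c : Nat), c + chunk.length < 6 →
      chunk.foldl pvStepB (cs, v, (c : Int)) =
        (cs, pvFoldMul v chunk, ((c + chunk.length : Nat) : Int)) := by
  induction chunk with
  | nil => intro cs v c h; simp [pvFoldMul]
  | cons b rest ih =>
    intro cs v c h
    have h' : c + rest.length + 1 < 6 := by simp only [List.length_cons] at h; omega
    simp only [List.foldl_cons]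
    have hne : ((c : Int) + 1 == 6) = false := by
      simp; omega
    simp only [pvStepB, hne, if_neg Bool.false_ne_true]
    have : (c : Int) + 1 = ((c + 1 : Nat) : Int) := by push_cast; ring
    rw [this, ih cs (v * 2 + b) (c + 1) (by omega)]
    simp [pvFoldMul]
    ring

-- a completed group emits exactly its character and resets the state
theorem pv_B_full (chunk : List Int) :
    ∀ (cs : List String) (v : Int) (c : Nat), c + chunk.length = 6 → c < 6 →
      chunk.foldl pvStepB (cs, v, (c : Int)) =
        (cs ++ [pvCharAt (pvFoldMul v chunk)], 0, 0) := by
  induction chunk with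
  | nil => intro cs v c h hc; simp at h; omega
  | cons b rest ih =>
    intro cs v c h hc
    have h' : c + rest.length + 1 = 6 := by simp only [List.length_cons] at h; omega
    simp only [List.foldl_cons]
    cases rest with
    | nil =>
      have hc5 : c = 5 := by simp at h; omega
      subst hc5
      simp [pvStepB, pvFoldMul]
    | cons r rs =>
      have hne : ((c : Int) + 1 == 6) = false := by
        simp; simp at h'; omega
      simp only [pvStepB, hne, if_neg Bool.false_ne_true]
      have : (c : Int) + 1 = ((c + 1 : Nat) : Int) := by push_cast; ring
      rw [this, ih cs (v * 2 + b) (c + 1) (by simp at h' ⊢; omega) (by simp at h'; omega)]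
      rfl

def pvFinishB (st : List String × Int × Int) : String :=
  PySem.Str.join ""
    (if st.2.2 > 0 then st.1 ++ [pvCharAt (st.2.1 * 2 ^ (6 - st.2.2).toNat)] else st.1)

-- padding a value with k zero bits multiplies it by 2^k
theorem pv_B_main (n : Nat) :
    ∀ (l : List Int), l.length ≤ n → ∀ (cs : List String),
      pvFinishB (l.foldl pvStepB (cs, 0, 0)) =
        PySem.Str.join "" (cs ++ (pvChunks6 l).map pvCharAt) := by
  induction n with
  | zero =>
    intro l hl cs
    have : l = [] := List.eq_nil_of_length_eq_zero (by omega)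
    subst this
    simp [pvFinishB, pvChunks6]
  | succ n ih =>
    intro l hl cs
    rcases Nat.lt_or_ge l.length 6 with h6 | h6
    · cases hl0 : l with
      | nil => simp [pvFinishB, pvChunks6]
      | cons x xs =>
        rw [← hl0]
        have hpos : 0 < l.length := by rw [hl0]; simp
        have : (0 : Int) = ((0 : Nat) : Int) := rfl
        rw [show ((cs, (0 : Int), (0 : Int))) = ((cs, (0 : Int), ((0 : Nat) : Int))) from rfl,
            pv_B_partial l cs 0 0 (by omega)]
        have hgt : ((((0 + l.length : Nat)) : Int) > 0) := by
          push_cast; omega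
        simp only [pvFinishB, hgt, if_pos]
        have htake : l.take 6 = l := List.take_of_length_le (by omega)
        have hdrop : l.drop 6 = [] := List.drop_eq_nil_of_le (by omega)
        have hch : pvChunks6 l = [pvPadVal l] := by
          rw [hl0, pvChunks6_cons, ← hl0, htake, hdrop, pvChunks6_nil]
        rw [hch]
        have hexp : ((6 : Int) - ((0 + l.length : Nat) : Int)).toNat = 6 - l.length := by
          omega
        simp only [hexp]
        simp [pvPadVal]
    · -- a full leading chunk
      have hsplit : l = l.take 6 ++ l.drop 6 := (List.take_append_drop 6 l).symm
      have hlen6 : (l.take 6).length = 6 := by simp [List.length_take]; omega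
      conv_lhs => rw [hsplit]
      rw [List.foldl_append]
      rw [show ((cs, (0 : Int), (0 : Int))) = ((cs, (0 : Int), ((0 : Nat) : Int))) from rfl,
          pv_B_full (l.take 6) cs 0 0 (by omega) (by omega)]
      rw [ih (l.drop 6) (by simp [List.length_drop]; omega)]
      have hch : pvChunks6 l = pvPadVal (l.take 6) :: pvChunks6 (l.drop 6) := by
        cases hl0 : l with
        | nil => rw [hl0] at h6; simp at h6
        | cons x xs => rw [pvChunks6_cons, ← hl0]
      rw [hch]
      have hpv : pvPadVal (l.take 6) = pvFoldMul 0 (l.take 6) := by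
        simp [pvPadVal, hlen6]
      rw [List.map_cons, hpv]
      simp [List.append_assoc]

theorem pv_B_eq (l : List Int) :
    bits_to_string_alt l = PySem.Str.join "" ((pvChunks6 l).map pvCharAt) := by
  simp only [bits_to_string_alt]
  have hst : l.foldl
      (fun (st : List String × Int × Int) bit =>
        let v := st.2.1 * 2 + bit
        let c := st.2.2 + 1
        if c == 6 then (st.1 ++ [pvCharAt v], 0, 0) else (st.1, v, c))
      (([] : List String), (0 : Int), (0 : Int))
      = l.foldl pvStepB (([] : List String), (0 : Int), (0 : Int)) := rfl
  rw [hst]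
  have := pv_B_main l.length l (le_refl _) []
  simpa [pvFinishB] using this

-- ===== VERDICT (by name: the statement is the Claim_ definition above) =====
theorem bits_to_string_spec : Claim_equal_bits_to_string := by
  intro l _ _
  unfold Spec_bits_to_string
  rw [pv_A_eq, pv_B_eq]
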